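-- pv_equiv track=rewrite | github.com/d-alchemist/youtube_create | university_rating_shift/make_video_stylebert_synced.py | preferred_style_name
-- ===== SOURCE A (Python) =====
-- from typing import Any
--
-- def contains_keyword(value: str, keywords: list[str]) -> bool:
--     text = value.lower()
--     return any(keyword.lower() in text for keyword in keywords)
--
-- def preferred_style_name(styles: dict[str, Any], keywords: list[str]) -> str | None:
--     if not keywords:
--         return None
--     for keyword in keywords:
--         for style_name in styles:
--             if style_name.lower() == keyword.lower():
--                 return style_name
--     for style_name in styles:
--         if contains_keyword(style_name, keywords):
--             return style_name
--     return None
-- ===== SOURCE B (Python) =====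
-- def preferred_style_name(styles, keywords):
--     pos = {}
--     for i, keyword in enumerate(keywords):
--         pos.setdefault(keyword.lower(), i)
--     best_i = len(keywords)      # keyword index of the best exact match so far
--     best_exact = None
--     for style_name in styles:
--         i = pos.get(style_name.lower())
--         if i is not None and i < best_i:
--             best_i, best_exact = i, style_name
--     if best_exact is not None:
--         return best_exact
--     lowered = [keyword.lower() for keyword in keywords]
--     for style_name in styles:
--         text = style_name.lower()
--         if any(lk in text for lk in lowered):
--             return style_name
--     return None
-- ===== Notes on version B (the rewrite author's own statement) =====
-- stated objective: alternative
-- what changed: B builds a first-wins dict from lowered keyword to its index once and replaces A's keyword-outer nested exact-match loops by a single argmin pass over the styles (minimal keyword index, earliest style on ties); the substring fallback runs only when no exact match exists.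
import Mathlib
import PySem

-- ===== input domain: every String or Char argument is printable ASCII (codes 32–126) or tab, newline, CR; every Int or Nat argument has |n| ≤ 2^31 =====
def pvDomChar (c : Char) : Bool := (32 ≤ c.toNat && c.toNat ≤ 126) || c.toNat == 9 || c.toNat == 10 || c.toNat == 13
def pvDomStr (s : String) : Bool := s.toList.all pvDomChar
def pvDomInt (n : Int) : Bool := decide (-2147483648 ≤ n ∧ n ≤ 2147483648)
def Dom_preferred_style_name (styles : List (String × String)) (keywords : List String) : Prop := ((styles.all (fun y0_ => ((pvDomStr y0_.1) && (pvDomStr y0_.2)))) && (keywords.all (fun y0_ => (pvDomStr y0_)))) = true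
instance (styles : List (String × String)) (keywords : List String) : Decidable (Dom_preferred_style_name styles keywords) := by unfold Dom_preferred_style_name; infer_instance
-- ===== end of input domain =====

-- B replaces A's keyword-outer nested exact-match loops by a first-wins dict from lowered keyword
-- to its index plus a single argmin pass over the styles; the substring fallback runs only when no
-- exact match exists.

-- ===== PORT A =====
def contains_keyword (value : String) (keywords : List String) : Bool :=
  let text := PySem.Str.lower value
  keywords.any (fun keyword => PySem.Str.isIn (PySem.Str.lower keyword) text)

def preferred_style_name (styles : List (String × String)) (keywords : List String) : Option String :=
  if keywords = [] then none
  else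
    match keywords.findSome? (fun keyword =>
        (styles.map (·.1)).find? (fun style_name =>
          PySem.Str.lower style_name == PySem.Str.lower keyword)) with
    | some style_name => some style_name
    | none =>
      (styles.map (·.1)).find? (fun style_name => contains_keyword style_name keywords)

-- ===== PORT B =====
def preferred_style_name_alt (styles : List (String × String)) (keywords : List String) : Option String :=
  -- pos = {}; for i, keyword in enumerate(keywords): pos.setdefault(keyword.lower(), i)
  let pos : PySem.Dict String Int :=
    (PySem.List.enumerate keywords).foldl
      (fun d p => if d.contains (PySem.Str.lower p.2) then d else d.insert (PySem.Str.lower p.2) p.1)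
      PySem.Dict.empty
  -- best_i = len(keywords); best_exact = None; argmin pass over styles
  let best := styles.foldl
    (fun (s : Int × Option String) p =>
      match pos.get? (PySem.Str.lower p.1) with
      | some i => if i < s.1 then (i, some p.1) else s
      | none => s)
    ((keywords.length : Int), none)
  match best.2 with
  | some n => some n
  | none =>
    -- substring fallback, only reached when no exact match exists
    let lowered := keywords.map PySem.Str.lower
    (styles.map (·.1)).find? (fun style_name =>
      let text := PySem.Str.lower style_name
      lowered.any (fun lk => PySem.Str.isIn lk text))

-- ===== PRECONDITION & SPEC =====
def Spec_preferred_style_name (styles : List (String × String)) (keywords : List String) (out : Option String) : Prop := out = preferred_style_name_alt styles keywords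
instance (styles : List (String × String)) (keywords : List String) (out : Option String) : Decidable (Spec_preferred_style_name styles keywords out) := by unfold Spec_preferred_style_name; infer_instance

-- ===== CLAIM =====
def Claim_equal_preferred_style_name : Prop := ∀ (styles : List (String × String)) (keywords : List String), Dom_preferred_style_name styles keywords → Spec_preferred_style_name styles keywords (preferred_style_name styles keywords)

-- ===== LEMMAS AND PROOFS =====

-- a Nat-indexed model of B's argmin step, used to relate the fold to A's exact phase
def gstep (lowered : List String) (s : Nat × Option String) (p : String × String) : Nat × Option String :=
  match PySem.List.index? lowered (PySem.Str.lower p.1) with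
  | some i => if i < s.1 then (i, some p.1) else s
  | none => s

-- A's exact phase truncated to the first t keywords
def Etrunc (lowered : List String) (t : Nat) (ns : List String) : Option String :=
  (lowered.take t).findSome? (fun lk => ns.find? (fun nm => PySem.Str.lower nm == lk))

-- lookup in the first-wins dict built by B equals a first-match scan of the pair list
theorem dict_fold_get? (l : List (Int × String)) (d : PySem.Dict String Int) (k : String) :
    (l.foldl (fun d p => if d.contains (PySem.Str.lower p.2) then d else d.insert (PySem.Str.lower p.2) p.1) d).get? k
      = (d.get? k).or ((l.find? (fun p => PySem.Str.lower p.2 == k)).map (·.1)) := by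
  induction l generalizing d with
  | nil => simp
  | cons p rest ih =>
    simp only [List.foldl_cons, List.find?_cons]
    by_cases hc : d.contains (PySem.Str.lower p.2)
    · rw [if_pos hc]
      by_cases hk : (PySem.Str.lower p.2 == k) = true
      · have heq : d.get? k = d.get? (PySem.Str.lower p.2) := by rw [eq_of_beq hk]
        rw [PySem.Dict.contains_eq_isSome_get?] at hc
        cases hg : d.get? k with
        | some v => simp [ih, hk, hg]
        | none => rw [heq] at hg; simp [hg] at hc
      · simp only [Bool.not_eq_true] at hk
        simp [ih, hk]
    · rw [if_neg hc]
      by_cases hk : (PySem.Str.lower p.2 == k) = true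
      · have hkey : PySem.Str.lower p.2 = k := eq_of_beq hk
        have hgn : d.get? k = none := by
          rw [PySem.Dict.contains_eq_isSome_get?] at hc
          rw [← hkey]
          cases hg : d.get? (PySem.Str.lower p.2) <;> simp_all
        rw [ih]
        subst hkey
        simp [PySem.Dict.get?_insert_self, hgn]
      · have hne : ¬ PySem.Str.lower p.2 = k := fun h => hk (by simp [h])
        rw [ih, PySem.Dict.get?_insert_of_ne _ _ (fun h => hne h.symm)]
        simp only [Bool.not_eq_true] at hk
        simp [hk]

-- the first-match scan over enumerate equals index? on the lowered keywords, shifted by the start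
theorem enum_find? (kws : List String) (s : Int) (k : String) :
    ((PySem.List.enumerate kws s).find? (fun p => PySem.Str.lower p.2 == k)).map (·.1)
      = (PySem.List.index? (kws.map PySem.Str.lower) k).map (fun n => s + (n : Int)) := by
  induction kws generalizing s with
  | nil => simp [PySem.List.enumerate_nil]
  | cons kw rest ih =>
    rw [PySem.List.enumerate_cons, List.find?_cons]
    by_cases hk : (PySem.Str.lower kw == k) = true
    · have hkey : PySem.Str.lower kw = k := eq_of_beq hk
      subst hkey
      rw [List.map_cons, PySem.List.index?_cons_self]
      simp
    · have hne : PySem.Str.lower kw ≠ k := fun h => hk (by simp [h])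
      rw [List.map_cons, PySem.List.index?_cons_of_ne _ hne]
      simp only [Bool.not_eq_true] at hk
      simp only [hk]
      rw [ih (s + 1)]
      cases hv : PySem.List.index? (rest.map PySem.Str.lower) k with
      | none => simp
      | some n =>
        simp
        omega

-- B's Int-indexed fold is the Nat-indexed model's fold, given the dict agrees with index?
theorem fold_cast (pos : PySem.Dict String Int) (lowered : List String)
    (hpos : ∀ k, pos.get? k = (PySem.List.index? lowered k).map (fun n => (n : Int)))
    (sts : List (String × String)) (bi : Nat) (be : Option String) :
    sts.foldl
      (fun (s : Int × Option String) p =>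
        match pos.get? (PySem.Str.lower p.1) with
        | some i => if i < s.1 then (i, some p.1) else s
        | none => s)
      ((bi : Int), be)
      = (((sts.foldl (gstep lowered) (bi, be)).1 : Int), (sts.foldl (gstep lowered) (bi, be)).2) := by
  induction sts generalizing bi be with
  | nil => rfl
  | cons p sts ih =>
    have hstep : (match pos.get? (PySem.Str.lower p.1) with
        | some i => if i < (((bi : Int), be) : Int × Option String).1 then (i, some p.1) else ((bi : Int), be)
        | none => (((bi : Int), be) : Int × Option String))
        = (((gstep lowered (bi, be) p).1 : Int), (gstep lowered (bi, be) p).2) := by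
      rw [hpos]
      cases hix : PySem.List.index? lowered (PySem.Str.lower p.1) with
      | none =>
        rw [PySem.List.index?_eq_idxOf?] at hix
        simp [gstep, hix]
      | some i =>
        rw [PySem.List.index?_eq_idxOf?] at hix
        by_cases hi : i < bi
        · simp [gstep, hix, hi]
        · simp [gstep, hix, hi]
    rw [List.foldl_cons, List.foldl_cons, hstep]
    rcases hgs : gstep lowered (bi, be) p with ⟨b2, be2⟩
    exact ih b2 be2

theorem findSome?_find?_nil (L : List String) :
    L.findSome? (fun lk => ([] : List String).find? (fun nm => PySem.Str.lower nm == lk)) = none := by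
  induction L with
  | nil => rfl
  | cons a L ih => simp [List.find?, ih]

theorem skipE (L : List String) (nm : String) (rest : List String)
    (h : ∀ lk ∈ L, (PySem.Str.lower nm == lk) = false) :
    L.findSome? (fun lk => (nm :: rest).find? (fun x => PySem.Str.lower x == lk))
      = L.findSome? (fun lk => rest.find? (fun x => PySem.Str.lower x == lk)) := by
  induction L with
  | nil => rfl
  | cons lk L ih =>
    simp only [List.findSome?_cons, List.find?_cons, h lk (List.mem_cons_self ..)]
    cases hr : rest.find? (fun x => PySem.Str.lower x == lk) with
    | some v => rfl
    | none => exact ih (fun y hy => h y (List.mem_cons_of_mem _ hy))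

theorem take_ne_of_lt (lowered : List String) (i : Nat) (text : String)
    (hmin : ∀ j, (hj : j < lowered.length) → j < i → lowered[j] ≠ text) :
    ∀ lk ∈ lowered.take i, (text == lk) = false := by
  intro lk hlk
  rw [List.mem_take_iff_getElem] at hlk
  obtain ⟨j, hj, hget⟩ := hlk
  have hj1 : j < lowered.length := lt_of_lt_of_le hj (Nat.min_le_right _ _)
  have hj2 : j < i := lt_of_lt_of_le hj (Nat.min_le_left _ _)
  have := hmin j hj1 hj2
  rw [beq_eq_false_iff_ne]
  intro he; exact this (hget ▸ he ▸ rfl)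

theorem gfold (lowered : List String) (sts : List (String × String)) (bi : Nat) (be : Option String) :
    (sts.foldl (gstep lowered) (bi, be)).2
      = (Etrunc lowered bi (sts.map (·.1))).or be := by
  induction sts generalizing bi be with
  | nil =>
    simp only [List.foldl_nil, List.map_nil, Etrunc]
    rw [findSome?_find?_nil]; rfl
  | cons p sts ih =>
    simp only [List.foldl_cons, List.map_cons]
    cases hix : PySem.List.index? lowered (PySem.Str.lower p.1) with
    | none =>
      have hnotin : PySem.Str.lower p.1 ∉ lowered := by
        rw [← PySem.List.index?_eq_none_iff]; exact hix
      have hskip : ∀ lk ∈ lowered.take bi, (PySem.Str.lower p.1 == lk) = false := by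
        intro lk hlk
        rw [beq_eq_false_iff_ne]
        intro he
        exact hnotin (he ▸ List.mem_of_mem_take hlk)
      simp only [gstep, hix]
      rw [ih]
      unfold Etrunc
      rw [skipE _ _ _ hskip]
    | some i =>
      obtain ⟨hilen, hget, hmin⟩ := PySem.List.getElem_of_index?_eq_some hix
      simp only [gstep, hix]
      by_cases hi : i < bi
      · simp only [hi, if_true]
        rw [ih]
        have hdecomp : lowered.take bi
            = lowered.take i ++ lowered[i] :: (lowered.drop (i + 1)).take (bi - i - 1) := by
          have h1 : bi = i + (bi - i) := by omega
          conv_lhs => rw [h1]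
          rw [List.take_add]
          congr 1
          rw [List.drop_eq_getElem_cons hilen]
          have h2 : bi - i = (bi - i - 1) + 1 := by omega
          rw [h2, List.take_succ_cons]
          simp
        unfold Etrunc
        rw [hdecomp, List.findSome?_append]
        have hskip : ∀ lk ∈ lowered.take i, (PySem.Str.lower p.1 == lk) = false :=
          take_ne_of_lt lowered i (PySem.Str.lower p.1) (fun j _ hji => hmin j hji)
        rw [skipE _ _ _ hskip]
        have hhead : (lowered[i] :: (lowered.drop (i + 1)).take (bi - i - 1)).findSome?
            (fun lk => ((p.1 :: sts.map (·.1)).find? (fun x => PySem.Str.lower x == lk)))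
            = some p.1 := by
          simp [List.find?_cons, hget]
        rw [hhead]
        cases (lowered.take i).findSome? (fun lk => (sts.map (·.1)).find? (fun x => PySem.Str.lower x == lk)) with
        | some m => rfl
        | none => rfl
      · simp only [hi, if_false]
        rw [ih]
        have hskip : ∀ lk ∈ lowered.take bi, (PySem.Str.lower p.1 == lk) = false :=
          take_ne_of_lt lowered bi (PySem.Str.lower p.1)
            (fun j _ hji => hmin j (lt_of_lt_of_le hji (Nat.le_of_not_lt hi)))
        unfold Etrunc
        rw [skipE _ _ _ hskip]

theorem pred_eq (keywords : List String) :
    (fun n => contains_keyword n keywords)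
      = fun nm => (keywords.map PySem.Str.lower).any (fun lk => PySem.Str.isIn lk (PySem.Str.lower nm)) := by
  funext n
  unfold contains_keyword
  rw [List.any_map]
  apply congrArg
  funext kw
  simp [Function.comp, PySem.Str.isIn, PySem.Str.toList_lower]

theorem preferred_style_name_spec' (styles : List (String × String)) (keywords : List String) :
    preferred_style_name styles keywords = preferred_style_name_alt styles keywords := by
  unfold preferred_style_name preferred_style_name_alt
  dsimp only
  have hpos : ∀ k,
      ((PySem.List.enumerate keywords).foldl
        (fun d p => if d.contains (PySem.Str.lower p.2) then d else d.insert (PySem.Str.lower p.2) p.1)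
        PySem.Dict.empty).get? k
      = (PySem.List.index? (keywords.map PySem.Str.lower) k).map (fun n => (n : Int)) := by
    intro k
    rw [dict_fold_get?, enum_find? keywords 0 k]
    simp
  rw [fold_cast _ _ hpos styles keywords.length none, gfold]
  unfold Etrunc
  rw [show keywords.length = (keywords.map PySem.Str.lower).length from (List.length_map ..).symm,
    List.take_length, Option.or_none, List.findSome?_map, ← pred_eq]
  by_cases hk : keywords = []
  · subst hk
    simp [contains_keyword]
  · rw [if_neg hk]
    have hsame : (keywords.findSome? (fun keyword =>
        (styles.map (·.1)).find? (fun style_name =>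
          PySem.Str.lower style_name == PySem.Str.lower keyword)))
        = keywords.findSome?
            ((fun lk => (styles.map (·.1)).find? (fun nm => PySem.Str.lower nm == lk)) ∘ PySem.Str.lower) := rfl
    rw [← hsame]

-- ===== VERDICT =====
theorem preferred_style_name_spec : Claim_equal_preferred_style_name := by
  intro styles keywords _
  unfold Spec_preferred_style_name
  exact preferred_style_name_spec' styles keywords
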